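-- pv_equiv track=rewrite | github.com/thinnguyen625/AI.basis-Project2 | 1712920_1712787_1712842/Phan_1/plresolve.py | sortProposition
-- ===== SOURCE A (Python) =====
-- Literals = {'A': 1, '-A': 2, 'B': 3, '-B': 4, 'C': 5, '-C': 6, 'D': 7, '-D': 8, 'E': 9, '-E': 10, 'F': 11, '-F': 12,
--             'G': 13, '-G': 14, 'H': 15, '-H': 16, 'I': 17, '-I': 18, 'J': 19, '-J': 20, 'K': 21, '-K': 22, 'L': 23, '-L': 24,
--             'M': 25, '-M': 26, 'N': 27, '-N': 28, 'O': 29, '-O': 30, 'P': 31, '-P': 32 ,'Q': 33, '-Q': 34, 'R': 35, '-R': 36,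
--             'S': 37, '-S': 38, 'T': 39, '-T': 40, 'U': 41, '-U': 42, 'V': 43, '-V': 44, 'W': 45, '-W': 46, 'X': 47, '-X': 48,
--             'Y': 49, '-Y': 50, 'Z': 51, '-Z': 52}
--
-- keys = list(Literals.keys())
--
-- values = list(Literals.values())
--
-- def sortProposition(proposition):
--     '''
--     Sort the proposition alphabetically\n
--     E.g.:
--     \t('-A', 'B', 'A') => ('A', '-A', 'B')
--     \t('-B', '-C', 'C') => ('-B', 'C', '-C')
--     '''
--     temp = []
--     for i in proposition:
--         temp.append(Literals[i])
--     temp = sorted(temp)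
--
--     res = []
--     for i in temp:
--         res.append(keys[values.index(i)])
--
--     res = tuple(res)
--
--     return res
-- ===== SOURCE B (Python) =====
-- Literals = {'A': 1, '-A': 2, 'B': 3, '-B': 4, 'C': 5, '-C': 6, 'D': 7, '-D': 8, 'E': 9, '-E': 10, 'F': 11, '-F': 12,
--             'G': 13, '-G': 14, 'H': 15, '-H': 16, 'I': 17, '-I': 18, 'J': 19, '-J': 20, 'K': 21, '-K': 22, 'L': 23, '-L': 24,
--             'M': 25, '-M': 26, 'N': 27, '-N': 28, 'O': 29, '-O': 30, 'P': 31, '-P': 32 ,'Q': 33, '-Q': 34, 'R': 35, '-R': 36,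
--             'S': 37, '-S': 38, 'T': 39, '-T': 40, 'U': 41, '-U': 42, 'V': 43, '-V': 44, 'W': 45, '-W': 46, 'X': 47, '-X': 48,
--             'Y': 49, '-Y': 50, 'Z': 51, '-Z': 52}
--
-- def sortProposition(proposition):
--     '''Bucket/counting strategy: no sort call at all -- walk the 52 canonical
--     literals in dict order and emit each one as many times as it occurs.'''
--     for lit in proposition:
--         Literals[lit]  # validate: KeyError on an unknown literal, as in A
--     return tuple(key for key in Literals for _ in range(proposition.count(key)))
-- ===== Notes on version B (the rewrite author's own statement) =====
-- stated objective: alternative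
-- what changed: B replaces A's encode-to-int / sort / decode-via-values.index pipeline with a counting (bucket) strategy: it walks the 52 canonical literals in dict order and emits each one proposition.count(key) times, never calling sort and never decoding.
import Mathlib
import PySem

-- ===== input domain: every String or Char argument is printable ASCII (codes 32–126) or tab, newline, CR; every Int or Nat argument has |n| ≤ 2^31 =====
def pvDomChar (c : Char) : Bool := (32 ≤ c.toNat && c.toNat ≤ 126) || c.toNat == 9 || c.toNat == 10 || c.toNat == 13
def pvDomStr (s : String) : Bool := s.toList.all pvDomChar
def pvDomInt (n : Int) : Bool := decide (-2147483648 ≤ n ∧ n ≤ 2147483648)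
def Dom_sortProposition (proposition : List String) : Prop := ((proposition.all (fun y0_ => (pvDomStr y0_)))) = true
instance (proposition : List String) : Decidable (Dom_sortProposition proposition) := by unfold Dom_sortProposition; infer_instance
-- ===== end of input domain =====

-- B replaces A's encode/sort/decode pipeline with a counting (bucket) pass over the 52 canonical literals; no sort, no decode.
-- Return-value note: the Pythons return a tuple; under the type convention both ports return the List String of its elements.

-- ===== PORT A =====
-- the module-level Literals dict and its keys/values lists
def pvLitPairs : List (String × Int) :=
  [("A", 1), ("-A", 2), ("B", 3), ("-B", 4), ("C", 5), ("-C", 6), ("D", 7), ("-D", 8),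
   ("E", 9), ("-E", 10), ("F", 11), ("-F", 12), ("G", 13), ("-G", 14), ("H", 15), ("-H", 16),
   ("I", 17), ("-I", 18), ("J", 19), ("-J", 20), ("K", 21), ("-K", 22), ("L", 23), ("-L", 24),
   ("M", 25), ("-M", 26), ("N", 27), ("-N", 28), ("O", 29), ("-O", 30), ("P", 31), ("-P", 32),
   ("Q", 33), ("-Q", 34), ("R", 35), ("-R", 36), ("S", 37), ("-S", 38), ("T", 39), ("-T", 40),
   ("U", 41), ("-U", 42), ("V", 43), ("-V", 44), ("W", 45), ("-W", 46), ("X", 47), ("-X", 48),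
   ("Y", 49), ("-Y", 50), ("Z", 51), ("-Z", 52)]

def pvLiterals : PySem.Dict String Int := PySem.Dict.ofList pvLitPairs
def pvKeys : List String := pvLiterals.keys
def pvValues : List Int := pvLiterals.values

-- Literals[i] — total form; Pre_ guarantees the key is present (KeyError excluded)
def pvLookup (i : String) : Int := pvLiterals.getD i 0

def sortProposition (proposition : List String) : List String :=
  -- temp = []; for i in proposition: temp.append(Literals[i])
  let temp := proposition.foldl (fun acc i => acc ++ [pvLookup i]) []
  -- temp = sorted(temp)
  let temp := PySem.List.sorted temp (fun v => v) false
  -- res = []; for i in temp: res.append(keys[values.index(i)])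
  let res := temp.foldl (fun acc i => acc ++ [PySem.List.pyGetD pvKeys (((PySem.List.index? pvValues i).getD 0 : Nat) : Int) ""]) []
  res

-- ===== PORT B =====
-- the 52 keys of Literals in dict iteration order ('for key in Literals')
def pvAllKeys : List String :=
  ["A", "-A", "B", "-B", "C", "-C", "D", "-D", "E", "-E", "F", "-F", "G", "-G", "H", "-H",
   "I", "-I", "J", "-J", "K", "-K", "L", "-L", "M", "-M", "N", "-N", "O", "-O", "P", "-P",
   "Q", "-Q", "R", "-R", "S", "-S", "T", "-T", "U", "-U", "V", "-V", "W", "-W", "X", "-X",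
   "Y", "-Y", "Z", "-Z"]

def sortProposition_alt (proposition : List String) : List String :=
  -- the validation loop 'for lit in proposition: Literals[lit]' only raises; under Pre_ it is a no-op
  -- tuple(key for key in Literals for _ in range(proposition.count(key)))
  pvAllKeys.flatMap (fun key => List.replicate (proposition.count key) key)

-- ===== PRECONDITION & SPEC =====
-- Pre_ excludes exactly the inputs containing a string that is not a key of Literals: there A raises KeyError (B raises it too).
def Pre_sortProposition (proposition : List String) : Prop :=
  ∀ x ∈ proposition, x ∈ pvAllKeys
instance (proposition : List String) : Decidable (Pre_sortProposition proposition) := by unfold Pre_sortProposition; infer_instance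

def pvWitness_sortProposition : List String := ["-A", "B", "A"]

def Spec_sortProposition (proposition : List String) (out : List String) : Prop := out = sortProposition_alt proposition
instance (proposition : List String) (out : List String) : Decidable (Spec_sortProposition proposition out) := by unfold Spec_sortProposition; infer_instance

-- ===== CLAIM (what is proved, stated in full; the proofs are below) =====
def Claim_equal_sortProposition : Prop := ∀ (proposition : List String), Dom_sortProposition proposition → Pre_sortProposition proposition → Spec_sortProposition proposition (sortProposition proposition)

-- ===== LEMMAS AND PROOFS =====

-- decoding the code of a valid literal gives the literal back (checked over the 52 keys)
set_option maxRecDepth 20000 in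
lemma pv_decode_lookup : ∀ x ∈ pvAllKeys,
    PySem.List.pyGetD pvKeys (((PySem.List.index? pvValues (pvLookup x)).getD 0 : Nat) : Int) "" = x := by
  decide

set_option maxRecDepth 20000 in
lemma pv_allKeys_nodup : pvAllKeys.Nodup := by decide

set_option maxRecDepth 20000 in
lemma pv_allKeys_codes : pvAllKeys.map pvLookup = PySem.List.pyRange 1 53 1 := by decide

lemma pv_allKeys_sorted : pvAllKeys.Pairwise (fun a b => pvLookup a < pvLookup b) := by
  have h := PySem.List.pairwise_lt_pyRange_one (a := 1) (b := 53)
  rw [← pv_allKeys_codes] at h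
  exact List.pairwise_map.mp h

-- how often each string occurs in the bucket concatenation
lemma pv_count_flat (ks : List String) (hnd : ks.Nodup) (xs : List String) (a : String) :
    (ks.flatMap (fun k => List.replicate (xs.count k) k)).count a
      = if a ∈ ks then xs.count a else 0 := by
  induction ks with
  | nil => simp
  | cons k ks ih =>
    rcases List.nodup_cons.mp hnd with ⟨hk, hnd'⟩
    by_cases hak : a = k
    · subst hak
      simp [List.count_append, ih hnd', hk]
    · simp [List.count_append, List.count_replicate, ih hnd', hak, Ne.symm hak]

-- the bucket concatenation is a permutation of the input
lemma pv_flat_perm (xs : List String) (hcov : ∀ x ∈ xs, x ∈ pvAllKeys) :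
    (pvAllKeys.flatMap (fun k => List.replicate (xs.count k) k)).Perm xs := by
  rw [List.perm_iff_count]
  intro a
  rw [pv_count_flat _ pv_allKeys_nodup]
  by_cases ha : a ∈ pvAllKeys
  · simp [ha]
  · simp [ha]
    exact (List.count_eq_zero.mpr (fun hmem => ha (hcov a hmem))).symm

-- codes of a bucket concatenation over strictly key-increasing buckets are nondecreasing
set_option maxRecDepth 20000 in
lemma pv_flat_sorted_codes_gen (n : String → Nat) (ks : List String)
    (h : ks.Pairwise (fun a b => pvLookup a < pvLookup b)) :
    (ks.flatMap (fun k => List.replicate (n k) (pvLookup k))).Pairwise (· ≤ ·) := by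
  induction ks with
  | nil => simp
  | cons k ks ih =>
    rcases List.pairwise_cons.mp h with ⟨hk, htl⟩
    simp only [List.flatMap_cons]
    apply List.pairwise_append.mpr
    refine ⟨?_, ih htl, ?_⟩
    · exact List.pairwise_replicate.mpr (Or.inr (le_refl _))
    · intro x hx y hy
      have hxk : x = pvLookup k := List.eq_of_mem_replicate hx
      rcases List.mem_flatMap.mp hy with ⟨k', hk', hy'⟩
      have hyk : y = pvLookup k' := List.eq_of_mem_replicate hy'
      subst hxk hyk
      exact le_of_lt (hk k' hk')

-- codes of the bucket concatenation are nondecreasing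
lemma pv_flat_sorted_codes (n : String → Nat) :
    ((pvAllKeys.flatMap (fun k => List.replicate (n k) k)).map pvLookup).Pairwise (· ≤ ·) := by
  rw [List.map_flatMap]
  simp only [List.map_replicate]
  exact pv_flat_sorted_codes_gen n pvAllKeys pv_allKeys_sorted

-- every element of the bucket concatenation is a canonical key
set_option maxRecDepth 20000 in
lemma pv_flat_mem (n : String → Nat) (x : String)
    (hx : x ∈ pvAllKeys.flatMap (fun k => List.replicate (n k) k)) : x ∈ pvAllKeys := by
  rcases List.mem_flatMap.mp hx with ⟨k, hk, hx'⟩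
  rw [List.eq_of_mem_replicate hx']
  exact hk

-- ===== VERDICT (by name: the statement is the Claim_ definition above) =====
set_option maxRecDepth 20000 in
theorem sortProposition_spec : Claim_equal_sortProposition := by
  intro proposition _ hpre
  unfold Spec_sortProposition sortProposition sortProposition_alt
  simp only [PySem.List.foldl_append_singleton_eq_map, List.nil_append]
  set B := pvAllKeys.flatMap (fun k => List.replicate (proposition.count k) k) with hB
  have hsort : PySem.List.sorted (proposition.map pvLookup) (fun v => v) false = B.map pvLookup := by
    apply PySem.List.sorted_id_eq_of_perm_of_pairwise
    · exact (pv_flat_perm proposition hpre).map pvLookup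
    · exact pv_flat_sorted_codes (fun k => proposition.count k)
  rw [hsort, List.map_map]
  conv_rhs => rw [← List.map_id B]
  apply List.map_congr_left
  intro x hx
  exact pv_decode_lookup x (pv_flat_mem _ x hx)
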